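-- pv_equiv track=rewrite | github.com/afcarl/essay-scoring-spring | lib/text_features.py | initial_kskipngrams
-- ===== SOURCE A (Python) =====
-- def initial_kskipngrams(sentence,skip,ngram):
--     if ngram == 1:
--         return [[sentence[0]]]
--     grams = []
--     for j in range(min(skip+1,len(sentence)-1)):
--         kmjskipnm1grams = initial_kskipngrams(sentence[j+1:],skip-j,ngram-1)
--         if kmjskipnm1grams is not None:
--             for gram in kmjskipnm1grams:
--                 grams.append([sentence[0]]+gram)
--     return grams
-- ===== SOURCE B (Python) =====
-- def initial_kskipngrams(sentence, skip, ngram):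
--     # Iterative level-by-level frontier expansion over (last_index, used_skips, gram) states.
--     if ngram == 1:
--         return [[sentence[0]]]
--     if ngram < 1 or not sentence:
--         return []
--     n = len(sentence)
--     frontier = [(0, 0, [sentence[0]])]
--     for _ in range(ngram - 1):
--         if not frontier:
--             break
--         nxt = []
--         for last, used, gram in frontier:
--             for i in range(last + 1, n):
--                 gap = i - last - 1
--                 if used + gap <= skip:
--                     nxt.append((i, used + gap, gram + [sentence[i]]))
--         frontier = nxt
--     return [g for (_, _, g) in frontier]
-- ===== Notes on version B (the rewrite author's own statement) =====
-- stated objective: alternative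
-- what changed: Replaces A's recursion on suffix slices (with a per-level remaining-skip budget) by an iterative breadth-first frontier expansion over (last index, used skips, gram) states, run ngram-1 rounds from the first token.
import Mathlib
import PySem

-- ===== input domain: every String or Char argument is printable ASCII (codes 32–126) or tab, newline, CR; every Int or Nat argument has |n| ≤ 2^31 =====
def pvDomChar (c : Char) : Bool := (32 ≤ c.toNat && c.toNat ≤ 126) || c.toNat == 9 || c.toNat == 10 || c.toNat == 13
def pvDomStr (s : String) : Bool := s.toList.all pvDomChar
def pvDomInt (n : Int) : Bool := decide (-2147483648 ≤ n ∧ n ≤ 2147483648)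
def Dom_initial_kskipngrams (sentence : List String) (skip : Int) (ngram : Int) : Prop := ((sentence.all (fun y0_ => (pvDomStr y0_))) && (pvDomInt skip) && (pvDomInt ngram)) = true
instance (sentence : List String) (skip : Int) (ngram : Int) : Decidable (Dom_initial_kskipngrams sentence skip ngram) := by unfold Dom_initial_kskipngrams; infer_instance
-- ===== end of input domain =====

-- B replaces A's suffix-slicing recursion by an iterative level-by-level frontier
-- expansion over (last index, used skips, gram) states; equivalence of return values.

-- ===== PORT A =====
-- literal port of A; sentence[j+1:] (j ≥ 0) is .drop (j+1), sentence[0] inside the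
-- loop is .headI (the loop runs only when the list has ≥ 2 elements); the
-- always-true 'is not None' test is dropped.
def initial_kskipngrams (sentence : List String) (skip : Int) (ngram : Int) : List (List String) :=
  if ngram = 1 then
    match sentence with
    | [] => []        -- Python raises IndexError (sentence[0]) here; excluded by Pre_
    | x :: _ => [[x]]
  else
    (PySem.List.pyRange 0 (min (skip + 1) ((sentence.length : Int) - 1)) 1).attach.foldl
      (fun grams j =>
        grams ++ (initial_kskipngrams (sentence.drop (j.1.toNat + 1)) (skip - j.1) (ngram - 1)).map
          (fun gram => sentence.headI :: gram))
      []
termination_by sentence.length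
decreasing_by
  have hj := j.2
  rw [PySem.List.mem_pyRange_one] at hj
  simp only [List.length_drop]
  omega

-- ===== PORT B =====
-- one expansion round of Source B's frontier loop (the two inner 'for' loops)
def pvExpand (sentence : List String) (skip : Int)
    (frontier : List (Nat × Int × List String)) : List (Nat × Int × List String) :=
  frontier.foldl
    (fun nxt st =>
      (List.range' (st.1 + 1) (sentence.length - (st.1 + 1))).foldl
        (fun nxt (i : Nat) =>
          if st.2.1 + ((i : Int) - (st.1 : Int) - 1) ≤ skip then
            nxt ++ [(i, st.2.1 + ((i : Int) - (st.1 : Int) - 1), st.2.2 ++ [sentence.getD i ""])]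
          else nxt)
        nxt)
    []

-- Source B's 'for _ in range(ngram-1)' loop with its early break on an empty frontier
def pvLoop (sentence : List String) (skip : Int) : Nat → List (Nat × Int × List String) → List (Nat × Int × List String)
  | 0, frontier => frontier
  | m + 1, frontier =>
      if frontier = [] then frontier
      else pvLoop sentence skip m (pvExpand sentence skip frontier)

def initial_kskipngrams_alt (sentence : List String) (skip : Int) (ngram : Int) : List (List String) :=
  if ngram = 1 then
    match sentence with
    | [] => []        -- Python raises IndexError here; excluded by Pre_
    | x :: _ => [[x]]
  else if ngram < 1 ∨ sentence = [] then []
  else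
    (pvLoop sentence skip (ngram - 1).toNat [(0, 0, [sentence.headI])]).map
      (fun st => st.2.2)

-- ===== PRECONDITION & SPEC =====
-- Pre_ excludes exactly the inputs (ngram == 1 with an empty sentence) on which
-- Python A raises IndexError on sentence[0]; B raises there as well.
def Pre_initial_kskipngrams (sentence : List String) (skip : Int) (ngram : Int) : Prop :=
  ¬ (ngram = 1 ∧ sentence = [])
instance (sentence : List String) (skip : Int) (ngram : Int) : Decidable (Pre_initial_kskipngrams sentence skip ngram) := by unfold Pre_initial_kskipngrams; infer_instance

def pvWitness_initial_kskipngrams : List String × Int × Int := (["a", "b", "c"], 1, 2)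

def Spec_initial_kskipngrams (sentence : List String) (skip : Int) (ngram : Int) (out : List (List String)) : Prop := out = initial_kskipngrams_alt sentence skip ngram
instance (sentence : List String) (skip : Int) (ngram : Int) (out : List (List String)) : Decidable (Spec_initial_kskipngrams sentence skip ngram out) := by unfold Spec_initial_kskipngrams; infer_instance

-- ===== CLAIM (what is proved, stated in full; the proofs are below) =====
def Claim_equal_initial_kskipngrams : Prop := ∀ (sentence : List String) (skip : Int) (ngram : Int), Dom_initial_kskipngrams sentence skip ngram → Pre_initial_kskipngrams sentence skip ngram → Spec_initial_kskipngrams sentence skip ngram (initial_kskipngrams sentence skip ngram)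

-- ===== LEMMAS AND PROOFS =====

-- extensions of length m of a partial gram ending at index p with u skips used:
-- final (last index, used skips, list of picked tokens), in pick (lexicographic) order
def pvExts (s : List String) (skip : Int) : Nat → Nat → Int → List (Nat × Int × List String)
  | 0, p, u => [(p, u, [])]
  | m+1, p, u =>
      (List.range' (p + 1) (s.length - (p + 1))).flatMap (fun (i : Nat) =>
        if u + ((i : Int) - (p : Int) - 1) ≤ skip then
          (pvExts s skip m i (u + ((i : Int) - (p : Int) - 1))).map
            (fun e => (e.1, e.2.1, s.getD i "" :: e.2.2))
        else [])

theorem pv_flatMap_congr {α β : Type} {l : List α} {f g : α → List β}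
    (h : ∀ a ∈ l, f a = g a) : l.flatMap f = l.flatMap g := by
  induction l with
  | nil => rfl
  | cons x xs ih =>
    simp only [List.flatMap_cons]
    rw [h x (by simp), ih (fun a ha => h a (by simp [ha]))]

theorem pv_bridge {α : Type} (c : Int) (L : Nat) (g : Int → List α) :
    (PySem.List.pyRange 0 (min (c + 1) (L : Int)) 1).flatMap g
      = (List.range L).flatMap (fun (t : Nat) => if (t : Int) ≤ c then g (t : Int) else []) := by
  rw [PySem.List.pyRange_one, List.flatMap_map]
  have hML : (min (c + 1) (L : Int) - 0).toNat ≤ L := by omega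
  conv_rhs => rw [show L = (min (c + 1) (L : Int) - 0).toNat + (L - (min (c + 1) (L : Int) - 0).toNat) by omega]
  rw [List.range_add, List.flatMap_append, List.flatMap_map]
  have h1 : (List.range ((min (c + 1) (L : Int) - 0).toNat)).flatMap
        (fun (t : Nat) => if (t : Int) ≤ c then g (t : Int) else [])
      = (List.range ((min (c + 1) (L : Int) - 0).toNat)).flatMap (fun (k : Nat) => g ((0 : Int) + (k : Int))) := by
    apply pv_flatMap_congr
    intro t ht
    simp only [List.mem_range] at ht
    have hc : (t : Int) ≤ c := by omega
    simp [hc]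
  rw [h1]
  have h2 : (List.range (L - (min (c + 1) (L : Int) - 0).toNat)).flatMap
        (fun k => (fun (t : Nat) => if (t : Int) ≤ c then g (t : Int) else [])
          ((min (c + 1) (L : Int) - 0).toNat + k))
      = (List.range (L - (min (c + 1) (L : Int) - 0).toNat)).flatMap (fun _ => ([] : List α)) := by
    apply pv_flatMap_congr
    intro t ht
    simp only [List.mem_range] at ht
    simp only []
    rw [if_neg (show ¬ (((min (c + 1) (L : Int) - 0).toNat + t : Nat) : Int) ≤ c by push_cast; omega)]
  rw [h2]
  simp

theorem pv_headI_drop (s : List String) (p : Nat) (hp : p < s.length) :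
    (s.drop p).headI = s.getD p "" := by
  have h1 : s.getD p "" = s[p] := by simp [List.getD, List.getElem?_eq_getElem hp]
  rw [h1, List.drop_eq_getElem_cons hp]
  rfl

-- A returns [] for every ngram ≤ 0 (the recursion bottoms out on short suffixes)
theorem pv_A_nonpos (s : List String) (skip ngram : Int) (h : ngram ≤ 0) :
    initial_kskipngrams s skip ngram = [] := by
  have key : ∀ (N : Nat) (s : List String), s.length ≤ N → ∀ (skip ngram : Int), ngram ≤ 0 →
      initial_kskipngrams s skip ngram = [] := by
    intro N
    induction N with
    | zero =>
      intro s hs skip ngram hng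
      have hnil : s = [] := List.length_eq_zero_iff.mp (Nat.le_zero.mp hs)
      subst hnil
      rw [initial_kskipngrams, if_neg (by omega)]
      rw [PySem.List.pyRange_one_eq_nil (by simp)]
      rfl
    | succ N ih =>
      intro s hs skip ngram hng
      rw [initial_kskipngrams.eq_def, if_neg (by omega)]
      rw [List.foldl_attach (f := fun (grams : List (List String)) (v : Int) =>
        grams ++ (initial_kskipngrams (s.drop (v.toNat + 1)) (skip - v) (ngram - 1)).map
          (fun gram => s.headI :: gram))]
      rw [PySem.List.foldl_append_eq_flatMap, List.nil_append]
      rw [List.flatMap_eq_nil_iff]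
      intro j hj
      rw [PySem.List.mem_pyRange_one] at hj
      rw [ih (s.drop (j.toNat + 1)) (by simp; omega) _ _ (by omega)]
      rfl
  exact key s.length s le_rfl skip ngram h

-- characterisation of A via pvExts
theorem pv_exts_A (m : Nat) (s : List String) :
    ∀ (p : Nat) (u skip : Int), p < s.length →
      initial_kskipngrams (s.drop p) (skip - u) ((m : Int) + 1)
        = (pvExts s skip m p u).map (fun e => s.getD p "" :: e.2.2) := by
  induction m with
  | zero =>
    intro p u skip hp
    rw [initial_kskipngrams.eq_def, if_pos (by simp)]
    rw [List.drop_eq_getElem_cons hp]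
    simp [pvExts, List.getD, List.getElem?_eq_getElem hp]
  | succ m ih =>
    intro p u skip hp
    rw [initial_kskipngrams.eq_def, if_neg (by push_cast; omega)]
    rw [List.foldl_attach (f := fun (grams : List (List String)) (v : Int) =>
      grams ++ (initial_kskipngrams ((s.drop p).drop (v.toNat + 1)) (skip - u - v)
          (((m + 1 : Nat) : Int) + 1 - 1)).map
        (fun gram => (s.drop p).headI :: gram))]
    rw [PySem.List.foldl_append_eq_flatMap, List.nil_append]
    simp only [List.length_drop]
    rw [show ((s.length - p : Nat) : Int) - 1 = ((s.length - (p + 1) : Nat) : Int) by omega]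
    rw [pv_bridge (c := skip - u) (L := s.length - (p + 1))
      (g := fun v => (initial_kskipngrams ((s.drop p).drop (v.toNat + 1)) (skip - u - v)
          (((m + 1 : Nat) : Int) + 1 - 1)).map
        (fun gram => (s.drop p).headI :: gram))]
    rw [pvExts, List.map_flatMap, List.range'_eq_map_range, List.flatMap_map]
    apply pv_flatMap_congr
    intro t ht
    simp only [List.mem_range] at ht
    rw [show ((p + 1 + t : Nat) : Int) - (p : Int) - 1 = (t : Int) by push_cast; ring]
    by_cases hcond : (t : Int) ≤ skip - u
    · rw [if_pos hcond, if_pos (by omega)]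
      rw [show ((t : Int).toNat + 1) = t + 1 by simp]
      rw [List.drop_drop, show p + (t + 1) = p + 1 + t by omega]
      rw [show skip - u - (t : Int) = skip - (u + (t : Int)) by ring]
      rw [show ((m + 1 : Nat) : Int) + 1 - 1 = (m : Int) + 1 by push_cast; ring]
      rw [ih (p + 1 + t) (u + (t : Int)) skip (by omega)]
      rw [pv_headI_drop s p hp, List.map_map, List.map_map]
      rfl
    · rw [if_neg hcond, if_neg (by omega), List.map_nil]

theorem pv_filter_map_flatMap {α β : Type} (l : List Nat) (q : Nat → Bool)
    (f : Nat → α) (G : α → List β) :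
    (((l.filter q).map f).flatMap G) = l.flatMap (fun i => if q i then G (f i) else []) := by
  induction l with
  | nil => rfl
  | cons x xs ih =>
    by_cases hx : q x <;> simp [hx, ih]

-- one expansion round as a flatMap
theorem pv_expand_eq (s : List String) (skip : Int) (fr : List (Nat × Int × List String)) :
    pvExpand s skip fr
      = fr.flatMap (fun st =>
          ((List.range' (st.1 + 1) (s.length - (st.1 + 1))).filter
              (fun (i : Nat) => decide (st.2.1 + ((i : Int) - (st.1 : Int) - 1) ≤ skip))).map
            (fun (i : Nat) => (i, st.2.1 + ((i : Int) - (st.1 : Int) - 1), st.2.2 ++ [s.getD i ""]))) := by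
  unfold pvExpand
  simp only [PySem.List.foldl_append_ite]
  rw [PySem.List.foldl_append_eq_flatMap, List.nil_append]

-- iterated expansion via pvExts
theorem pv_iter_exts (s : List String) (skip : Int) (m : Nat) :
    ∀ (fr : List (Nat × Int × List String)),
      (List.range m).foldl (fun frontier _ => pvExpand s skip frontier) fr
        = fr.flatMap (fun st =>
            (pvExts s skip m st.1 st.2.1).map (fun e => (e.1, e.2.1, st.2.2 ++ e.2.2))) := by
  induction m with
  | zero =>
    intro fr
    simp [pvExts]
  | succ m ih =>
    intro fr
    rw [List.range_succ_eq_map, List.foldl_cons, List.foldl_map, ih (pvExpand s skip fr)]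
    rw [pv_expand_eq, List.flatMap_assoc]
    apply pv_flatMap_congr
    intro st _
    rw [pv_filter_map_flatMap]
    conv_rhs => rw [pvExts]
    rw [List.map_flatMap]
    apply pv_flatMap_congr
    intro i _
    by_cases hc : st.2.1 + ((i : Int) - (st.1 : Int) - 1) ≤ skip
    · simp [hc, List.map_map, Function.comp_def, List.append_assoc]
    · simp [hc]

-- the early-break loop computes the same frontier as the plain iteration
theorem pv_loop_eq (s : List String) (skip : Int) :
    ∀ (m : Nat) (fr : List (Nat × Int × List String)),
      pvLoop s skip m fr = (List.range m).foldl (fun frontier _ => pvExpand s skip frontier) fr := by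
  intro m
  induction m with
  | zero => intro fr; rfl
  | succ m ih =>
    intro fr
    rw [pvLoop]
    by_cases hfr : fr = []
    · rw [if_pos hfr, hfr, pv_iter_exts]
      rfl
    · rw [if_neg hfr, ih (pvExpand s skip fr)]
      rw [List.range_succ_eq_map, List.foldl_cons, List.foldl_map]

-- ===== VERDICT (by name: the statement is the Claim_ definition above) =====
theorem initial_kskipngrams_spec : Claim_equal_initial_kskipngrams := by
  intro sentence skip ngram _ hpre
  unfold Spec_initial_kskipngrams
  by_cases h1 : ngram = 1
  · subst h1
    rw [initial_kskipngrams.eq_def, initial_kskipngrams_alt.eq_def, if_pos rfl, if_pos rfl]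
  · by_cases h2 : ngram < 1 ∨ sentence = []
    · rw [initial_kskipngrams_alt.eq_def, if_neg h1, if_pos h2]
      rcases h2 with h2 | h2
      · exact pv_A_nonpos _ _ _ (by omega)
      · subst h2
        rw [initial_kskipngrams.eq_def, if_neg h1]
        rw [PySem.List.pyRange_one_eq_nil (by simp)]
        rfl
    · push_neg at h2
      obtain ⟨hng, hne⟩ := h2
      obtain ⟨x, rest, rfl⟩ : ∃ x rest, sentence = x :: rest := by
        cases sentence with
        | nil => exact absurd rfl hne
        | cons x rest => exact ⟨x, rest, rfl⟩
      rw [initial_kskipngrams_alt.eq_def, if_neg h1, if_neg (by push_neg; exact ⟨hng, hne⟩)]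
      rw [pv_loop_eq, pv_iter_exts]
      have hA := pv_exts_A (ngram - 1).toNat (x :: rest) 0 0 skip (by simp)
      rw [List.drop_zero] at hA
      rw [show ((((ngram - 1).toNat : Int)) + 1) = ngram by omega] at hA
      rw [show skip - 0 = skip by ring] at hA
      rw [hA]
      simp [Function.comp_def]
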